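-- pv_equiv track=rewrite | github.com/Zombiesama18/Leetcode_Python | Leetcode/Leetcode_1818. 绝对差值和.py | minAbsoluteSumDiffBinarySearch
-- ===== SOURCE A (Python) =====
-- def minAbsoluteSumDiffBinarySearch(nums1: [int], nums2: [int]) -> int:
--     def binarySearch(targetList: [int], targetElement: int):
--         left, right = 0, len(targetList) - 1
--         if targetList[right] < targetElement:
--             return right + 1
--         while left < right:
--             mid = (left + right) // 2
--             if targetList[mid] < targetElement:
--                 left = mid + 1
--             else:
--                 right = mid
--         return left
--
--     mod, length, absoluteSum, maxn = 1000000007, len(nums1), 0, 0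
--     length = len(nums1)
--     tempList = nums1[:]
--     tempList.sort()
--     for i in range(length):
--         difference = abs(nums1[i] - nums2[i])
--         absoluteSum = (absoluteSum + difference) % mod
--         j = binarySearch(tempList, nums2[i])
--         if j < length:
--             maxn = max(maxn, difference - (tempList[j] - nums2[i]))
--         if j > 0:
--             maxn = max(maxn, difference - (nums2[i] - tempList[j - 1]))
--     return (absoluteSum - maxn + mod) % mod
-- ===== SOURCE B (Python) =====
-- def minAbsoluteSumDiffBinarySearch(nums1: [int], nums2: [int]) -> int:
--     mod = 1000000007
--     absoluteSum = 0
--     maxn = 0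
--     for i in range(len(nums1)):
--         difference = abs(nums1[i] - nums2[i])
--         absoluteSum = (absoluteSum + difference) % mod
--         minDist = min(abs(x - nums2[i]) for x in nums1)
--         maxn = max(maxn, difference - minDist)
--     return (absoluteSum - maxn + mod) % mod
-- ===== Notes on version B (the rewrite author's own statement) =====
-- stated objective: simpler
-- what changed: Drops the sort and the hand-written binary-search helper; for each index it finds the nearest replacement value by a direct inner min-scan over nums1, accumulating the same sum and best reduction in one loop.
-- outside the precondition, e.g. on minAbsoluteSumDiffBinarySearch([1, 2], [5]): A raises IndexError, B raises IndexError
import Mathlib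
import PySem

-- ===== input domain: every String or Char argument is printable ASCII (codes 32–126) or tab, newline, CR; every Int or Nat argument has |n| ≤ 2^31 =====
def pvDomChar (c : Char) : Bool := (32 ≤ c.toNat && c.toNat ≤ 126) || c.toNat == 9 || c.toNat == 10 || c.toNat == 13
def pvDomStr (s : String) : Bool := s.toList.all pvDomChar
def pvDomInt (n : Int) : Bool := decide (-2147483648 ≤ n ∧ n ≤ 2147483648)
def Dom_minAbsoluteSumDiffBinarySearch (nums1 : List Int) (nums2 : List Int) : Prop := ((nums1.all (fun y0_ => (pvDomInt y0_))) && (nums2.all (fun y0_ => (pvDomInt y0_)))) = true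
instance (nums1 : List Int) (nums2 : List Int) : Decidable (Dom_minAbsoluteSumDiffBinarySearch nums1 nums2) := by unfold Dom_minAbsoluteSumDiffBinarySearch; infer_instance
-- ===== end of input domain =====

-- B replaces A's sort + hand-written binary search by a direct inner min-scan for the
-- nearest replacement value (objective: simpler; no speed claim).

-- ===== PORT A =====
-- the inner 'while left < right' loop of binarySearch (mid inlined)
def pvBSLoop (t : List Int) (v : Int) (left right : Nat) : Nat :=
  if _h : left < right then
    if t.getD ((left + right) / 2) 0 < v then pvBSLoop t v ((left + right) / 2 + 1) right
    else pvBSLoop t v left ((left + right) / 2)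
  else left
termination_by right - left
decreasing_by all_goals omega

-- the helper binarySearch(targetList, targetElement); A only calls it on a nonempty list
def pvBinarySearch (t : List Int) (v : Int) : Nat :=
  if t.getD (t.length - 1) 0 < v then t.length
  else pvBSLoop t v 0 (t.length - 1)

def minAbsoluteSumDiffBinarySearch (nums1 : List Int) (nums2 : List Int) : Int :=
  let md : Int := 1000000007
  let length := nums1.length
  let tempList := PySem.List.sorted nums1 (fun x => x) false
  let st := (List.range length).foldl (fun (st : Int × Int) i =>
    let difference := |nums1.getD i 0 - nums2.getD i 0|
    let s := PySem.Int.mod (st.1 + difference) md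
    let j := pvBinarySearch tempList (nums2.getD i 0)
    let m1 := if j < length then max st.2 (difference - (tempList.getD j 0 - nums2.getD i 0)) else st.2
    let m2 := if 0 < j then max m1 (difference - (nums2.getD i 0 - tempList.getD (j - 1) 0)) else m1
    (s, m2)) (0, 0)
  PySem.Int.mod (st.1 - st.2 + md) md

-- ===== PORT B =====
def minAbsoluteSumDiffBinarySearch_alt (nums1 : List Int) (nums2 : List Int) : Int :=
  let md : Int := 1000000007
  let st := (List.range nums1.length).foldl (fun (st : Int × Int) i =>
    let difference := |nums1.getD i 0 - nums2.getD i 0|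
    let s := PySem.Int.mod (st.1 + difference) md
    let minDist := (PySem.List.min? (nums1.map (fun x => |x - nums2.getD i 0|)) (fun y => y)).getD 0
    (s, max st.2 (difference - minDist))) (0, 0)
  PySem.Int.mod (st.1 - st.2 + md) md

-- ===== PRECONDITION & SPEC =====
-- Pre_ excludes exactly the inputs where nums2 is shorter than nums1, on which A raises IndexError.
def Pre_minAbsoluteSumDiffBinarySearch (nums1 : List Int) (nums2 : List Int) : Prop :=
  nums1.length ≤ nums2.length
instance (nums1 : List Int) (nums2 : List Int) : Decidable (Pre_minAbsoluteSumDiffBinarySearch nums1 nums2) := by unfold Pre_minAbsoluteSumDiffBinarySearch; infer_instance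

def pvWitness_minAbsoluteSumDiffBinarySearch : List Int × List Int := ([1, 7, 5], [2, 3, 5])

def Spec_minAbsoluteSumDiffBinarySearch (nums1 : List Int) (nums2 : List Int) (out : Int) : Prop := out = minAbsoluteSumDiffBinarySearch_alt nums1 nums2
instance (nums1 : List Int) (nums2 : List Int) (out : Int) : Decidable (Spec_minAbsoluteSumDiffBinarySearch nums1 nums2 out) := by unfold Spec_minAbsoluteSumDiffBinarySearch; infer_instance

-- ===== CLAIM (what is proved, stated in full; the proofs are below) =====
def Claim_equal_minAbsoluteSumDiffBinarySearch : Prop := ∀ (nums1 : List Int) (nums2 : List Int), Dom_minAbsoluteSumDiffBinarySearch nums1 nums2 → Pre_minAbsoluteSumDiffBinarySearch nums1 nums2 → Spec_minAbsoluteSumDiffBinarySearch nums1 nums2 (minAbsoluteSumDiffBinarySearch nums1 nums2)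

-- ===== LEMMAS AND PROOFS =====

-- sorted(nums1) is monotone at getD-indices
theorem sorted_getD_mono (xs : List Int) (p q : Nat) (hpq : p ≤ q)
    (hq : q < (PySem.List.sorted xs (fun x => x) false).length) :
    (PySem.List.sorted xs (fun x => x) false).getD p 0 ≤ (PySem.List.sorted xs (fun x => x) false).getD q 0 := by
  rw [List.getD_eq_getElem _ _ (lt_of_le_of_lt hpq hq), List.getD_eq_getElem _ _ hq]
  exact PySem.List.sorted_id_getElem_mono xs hpq hq

-- the binary-search loop returns the first index j in [left, right] with v ≤ t[j]
theorem pvBSLoop_spec (t : List Int) (v : Int)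
    (hs : ∀ p q : Nat, p ≤ q → q < t.length → t.getD p 0 ≤ t.getD q 0) :
    ∀ (d left right : Nat), right - left ≤ d → left ≤ right → right < t.length →
      (∀ k < left, t.getD k 0 < v) → v ≤ t.getD right 0 →
      left ≤ pvBSLoop t v left right ∧ pvBSLoop t v left right ≤ right ∧
        (∀ k < pvBSLoop t v left right, t.getD k 0 < v) ∧
        v ≤ t.getD (pvBSLoop t v left right) 0 := by
  intro d
  induction d with
  | zero =>
    intro left right hd hlr hr hL hR
    have he : left = right := by omega
    rw [pvBSLoop, dif_neg (by omega)]
    subst he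
    exact ⟨le_refl _, le_refl _, hL, hR⟩
  | succ d ih =>
    intro left right hd hlr hr hL hR
    rw [pvBSLoop]
    by_cases h : left < right
    · rw [dif_pos h]
      by_cases hm : t.getD ((left + right) / 2) 0 < v
      · rw [if_pos hm]
        have hres := ih ((left + right) / 2 + 1) right (by omega) (by omega) hr
          (fun k hk => lt_of_le_of_lt (hs k ((left + right) / 2) (by omega) (by omega)) hm) hR
        exact ⟨by omega, hres.2.1, hres.2.2.1, hres.2.2.2⟩
      · rw [if_neg hm]
        have hres := ih left ((left + right) / 2) (by omega) (by omega) (by omega) hL (not_lt.mp hm)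
        exact ⟨hres.1, by omega, hres.2.2.1, hres.2.2.2⟩
    · rw [dif_neg h]
      have he : left = right := by omega
      subst he
      exact ⟨le_refl _, le_refl _, hL, hR⟩

-- full characterisation of A's binarySearch on a nonempty monotone list
theorem pvBinarySearch_spec (t : List Int) (v : Int) (hne : t ≠ [])
    (hs : ∀ p q : Nat, p ≤ q → q < t.length → t.getD p 0 ≤ t.getD q 0) :
    pvBinarySearch t v ≤ t.length ∧
      (∀ k < pvBinarySearch t v, t.getD k 0 < v) ∧
      (∀ k, pvBinarySearch t v ≤ k → k < t.length → v ≤ t.getD k 0) := by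
  have hlen : 0 < t.length := List.length_pos_iff.mpr hne
  unfold pvBinarySearch
  by_cases h : t.getD (t.length - 1) 0 < v
  · rw [if_pos h]
    exact ⟨le_refl _,
      fun k hk => lt_of_le_of_lt (hs k (t.length - 1) (by omega) (by omega)) h,
      fun k hk hk' => absurd hk' (by omega)⟩
  · rw [if_neg h]
    have hres := pvBSLoop_spec t v hs t.length 0 (t.length - 1) (by omega) (by omega)
      (by omega) (fun k hk => absurd hk (by omega)) (not_lt.mp h)
    exact ⟨by omega, hres.2.2.1,
      fun k hk hk' => le_trans hres.2.2.2 (hs _ k hk (by omega))⟩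

-- the combined two-candidate maxn update of A equals B's single nearest-distance update
theorem step_max_eq (nums1 : List Int) (v d m0 : Int) (hne : nums1 ≠ []) :
    (if 0 < pvBinarySearch (PySem.List.sorted nums1 (fun x => x) false) v then
       max (if pvBinarySearch (PySem.List.sorted nums1 (fun x => x) false) v < nums1.length then
              max m0 (d - ((PySem.List.sorted nums1 (fun x => x) false).getD
                (pvBinarySearch (PySem.List.sorted nums1 (fun x => x) false) v) 0 - v))
            else m0)
           (d - (v - (PySem.List.sorted nums1 (fun x => x) false).getD
                (pvBinarySearch (PySem.List.sorted nums1 (fun x => x) false) v - 1) 0))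
     else
       (if pvBinarySearch (PySem.List.sorted nums1 (fun x => x) false) v < nums1.length then
          max m0 (d - ((PySem.List.sorted nums1 (fun x => x) false).getD
            (pvBinarySearch (PySem.List.sorted nums1 (fun x => x) false) v) 0 - v))
        else m0))
    = max m0 (d - (PySem.List.min? (nums1.map fun x => |x - v|) (fun y => y)).getD 0) := by
  set t := PySem.List.sorted nums1 (fun x => x) false with ht
  set j := pvBinarySearch t v with hjdef
  have hperm := PySem.List.sorted_perm nums1 (fun x => x) false
  have hlen : t.length = nums1.length := hperm.length_eq
  have htne : t ≠ [] := by
    intro h'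
    exact hne (List.length_eq_zero_iff.mp (by rw [← hlen, h', List.length_nil]))
  have hpos : 0 < nums1.length := List.length_pos_iff.mpr hne
  have hs : ∀ p q : Nat, p ≤ q → q < t.length → t.getD p 0 ≤ t.getD q 0 :=
    fun p q hpq hq => sorted_getD_mono nums1 p q hpq hq
  obtain ⟨hjle, hlt, hge⟩ := pvBinarySearch_spec t v htne hs
  -- getD-indices of t are members of nums1
  have hmem : ∀ k, k < t.length → t.getD k 0 ∈ nums1 := by
    intro k hk
    rw [List.getD_eq_getElem _ _ hk]
    exact (PySem.List.mem_sorted nums1 (fun x => x) false _).mp (List.getElem_mem hk)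
  -- characterise B's minDist
  obtain ⟨dm, hdm⟩ : ∃ dm, PySem.List.min? (nums1.map fun x => |x - v|) (fun y => y) = some dm := by
    cases hmo : PySem.List.min? (nums1.map fun x => |x - v|) (fun y => y) with
    | none =>
      exact absurd ((PySem.List.min?_eq_none_iff _ _).mp hmo) (by simp [hne])
    | some m => exact ⟨m, rfl⟩
  have hdmget : (PySem.List.min? (nums1.map fun x => |x - v|) (fun y => y)).getD 0 = dm := by
    rw [hdm]; rfl
  obtain ⟨x0, hx0mem, hx0⟩ := List.mem_map.mp (PySem.List.min?_mem hdm)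
  have hminle : ∀ x ∈ nums1, dm ≤ |x - v| := by
    intro x hx
    exact PySem.List.min?_isMin hdm _ (List.mem_map.mpr ⟨x, hx, rfl⟩)
  -- x0 sits at some index of t
  have hx0t : x0 ∈ t := (PySem.List.mem_sorted nums1 (fun x => x) false x0).mpr hx0mem
  obtain ⟨k0, hk0, hk0x⟩ := List.mem_iff_getElem.mp hx0t
  have hk0get : t.getD k0 0 = x0 := by rw [List.getD_eq_getElem _ _ hk0]; exact hk0x
  rw [hdmget]
  have hjlen : j ≤ nums1.length := by omega
  rcases Nat.lt_or_ge 0 j with hj0 | hj0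
  · rcases Nat.lt_or_ge j nums1.length with hjl | hjl
    · -- 0 < j < length : both candidates fire
      rw [if_pos hj0, if_pos hjl]
      have ha : dm ≤ t.getD j 0 - v := by
        have := hminle _ (hmem j (by omega))
        have hvj : v ≤ t.getD j 0 := hge j (le_refl _) (by omega)
        rwa [abs_of_nonneg (by omega)] at this
      have hb : dm ≤ v - t.getD (j - 1) 0 := by
        have := hminle _ (hmem (j - 1) (by omega))
        have hvj : t.getD (j - 1) 0 < v := hlt (j - 1) (by omega)
        rwa [abs_of_nonpos (by omega), neg_sub] at this
      have hc : t.getD j 0 - v ≤ dm ∨ v - t.getD (j - 1) 0 ≤ dm := by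
        rcases Nat.lt_or_ge k0 j with hk | hk
        · right
          have h1 : t.getD k0 0 < v := hlt k0 hk
          have h2 : t.getD k0 0 ≤ t.getD (j - 1) 0 := hs k0 (j - 1) (by omega) (by omega)
          rw [← hx0, ← hk0get, abs_of_nonpos (by omega), neg_sub]
          omega
        · left
          have h1 : v ≤ t.getD k0 0 := hge k0 hk (by omega)
          have h2 : t.getD j 0 ≤ t.getD k0 0 := hs j k0 hk (by omega)
          rw [← hx0, ← hk0get, abs_of_nonneg (by omega)]
          omega
      omega
    · -- j = length : only the left-neighbour candidate
      rw [if_pos hj0, if_neg (by omega : ¬ j < nums1.length)]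
      have hb : dm ≤ v - t.getD (j - 1) 0 := by
        have := hminle _ (hmem (j - 1) (by omega))
        have hvj : t.getD (j - 1) 0 < v := hlt (j - 1) (by omega)
        rwa [abs_of_nonpos (by omega), neg_sub] at this
      have hc : v - t.getD (j - 1) 0 ≤ dm := by
        have h1 : t.getD k0 0 < v := hlt k0 (by omega)
        have h2 : t.getD k0 0 ≤ t.getD (j - 1) 0 := hs k0 (j - 1) (by omega) (by omega)
        rw [← hx0, ← hk0get, abs_of_nonpos (by omega), neg_sub]
        omega
      omega
  · -- j = 0 : only the right-neighbour candidate
    rw [if_neg (by omega : ¬ 0 < j), if_pos (by omega : j < nums1.length)]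
    have hj : j = 0 := by omega
    have ha : dm ≤ t.getD j 0 - v := by
      have := hminle _ (hmem j (by omega))
      have hvj : v ≤ t.getD j 0 := hge j (le_refl _) (by omega)
      rwa [abs_of_nonneg (by omega)] at this
    have hc : t.getD j 0 - v ≤ dm := by
      have h1 : v ≤ t.getD k0 0 := hge k0 (by omega) (by omega)
      have h2 : t.getD j 0 ≤ t.getD k0 0 := hs j k0 (by omega) (by omega)
      rw [← hx0, ← hk0get, abs_of_nonneg (by omega)]
      omega
    omega

-- ===== VERDICT (by name: the statement is the Claim_ definition above) =====
theorem minAbsoluteSumDiffBinarySearch_spec : Claim_equal_minAbsoluteSumDiffBinarySearch := by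
  intro nums1 nums2 _ _
  unfold Spec_minAbsoluteSumDiffBinarySearch
  unfold minAbsoluteSumDiffBinarySearch minAbsoluteSumDiffBinarySearch_alt
  have hfold := PySem.List.foldl_congr_mem (List.range nums1.length)
    (fun (st : Int × Int) i =>
      let difference := |nums1.getD i 0 - nums2.getD i 0|
      let s := PySem.Int.mod (st.1 + difference) 1000000007
      let j := pvBinarySearch (PySem.List.sorted nums1 (fun x => x) false) (nums2.getD i 0)
      let m1 := if j < nums1.length then
          max st.2 (difference - ((PySem.List.sorted nums1 (fun x => x) false).getD j 0 - nums2.getD i 0)) else st.2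
      let m2 := if 0 < j then
          max m1 (difference - (nums2.getD i 0 - (PySem.List.sorted nums1 (fun x => x) false).getD (j - 1) 0)) else m1
      (s, m2))
    (fun (st : Int × Int) i =>
      let difference := |nums1.getD i 0 - nums2.getD i 0|
      let s := PySem.Int.mod (st.1 + difference) 1000000007
      let minDist := (PySem.List.min? (nums1.map (fun x => |x - nums2.getD i 0|)) (fun y => y)).getD 0
      (s, max st.2 (difference - minDist)))
    ((0 : Int), (0 : Int))
    (by
      intro acc i hi
      have hi' : i < nums1.length := List.mem_range.mp hi
      have hne : nums1 ≠ [] := by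
        intro h'
        rw [h'] at hi'
        exact absurd hi' (by simp)
      exact Prod.ext rfl (step_max_eq nums1 (nums2.getD i 0) |nums1.getD i 0 - nums2.getD i 0| acc.2 hne))
  simp only [hfold]
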